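-- pv_equiv track=rewrite | github.com/TDK1969/My-Leetcode | contest/weekly-contest-247/1914.cyclically-rotating-a-grid.py | rotateGrid
-- ===== SOURCE A (Python) =====
-- def rotateGrid(grid, k):
--     m = len(grid)
--     n = len(grid[0])
--     term = min(m, n) // 2
--
--     for i in range(term):
--         linar = []
--         for j in range(i, n - i):
--             linar.append(grid[i][j])
--         linar.pop()
--         for p in range(i, m - i):
--             linar.append(grid[p][n - i - 1])
--         linar.pop()
--         for j in range(n - i - 1, i - 1, -1):
--             linar.append(grid[m - i - 1][j])
--         linar.pop()
--         for p in range(m - i - 1, i - 1 , -1):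
--             linar.append(grid[p][i])
--         linar.pop()
--
--         kk = k
--         k = k % len(linar)
--         for j in range(k):
--             linar.append(linar.pop(0))
--         k = kk
--
--         for j in range(i, n - i):
--             grid[i][j] = linar.pop(0)
--         for p in range(i, m - i):
--             if p == i:
--                 continue
--             grid[p][n - i - 1] = linar.pop(0)
--         for j in range(n - i - 1, i - 1, -1):
--             if j == n - i - 1:
--                 continue
--             grid[m - i - 1][j] = linar.pop(0)
--         for p in range(m - i - 1, i - 1 , -1):
--             if p == m - i - 1 or p == i:
--                 continue
--             grid[p][i] = linar.pop(0)
--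
--     return grid
-- ===== SOURCE B (Python) =====
-- def rotateGrid(grid, k):
--     m, n = len(grid), len(grid[0])
--     for i in range(min(m, n) // 2):
--         coords = ([(i, j) for j in range(i, n - i - 1)] +
--                   [(p, n - i - 1) for p in range(i, m - i - 1)] +
--                   [(m - i - 1, j) for j in range(n - i - 1, i, -1)] +
--                   [(p, i) for p in range(m - i - 1, i, -1)])
--         vals = [grid[r][c] for r, c in coords]
--         s = k % len(vals)
--         vals = vals[s:] + vals[:s]
--         for (r, c), v in zip(coords, vals):
--             grid[r][c] = v
--     return grid
-- ===== Notes on version B (the rewrite author's own statement) =====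
-- stated objective: simpler
-- what changed: B replaces A's eight hand-unrolled side loops with pop()/continue corner bookkeeping by one generic ring pass: build the ring's coordinate list once, read the values, rotate by slicing (vals[s:]+vals[:s]) instead of A's loop of s front-pop-and-appends, and zip-write back.
import Mathlib
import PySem

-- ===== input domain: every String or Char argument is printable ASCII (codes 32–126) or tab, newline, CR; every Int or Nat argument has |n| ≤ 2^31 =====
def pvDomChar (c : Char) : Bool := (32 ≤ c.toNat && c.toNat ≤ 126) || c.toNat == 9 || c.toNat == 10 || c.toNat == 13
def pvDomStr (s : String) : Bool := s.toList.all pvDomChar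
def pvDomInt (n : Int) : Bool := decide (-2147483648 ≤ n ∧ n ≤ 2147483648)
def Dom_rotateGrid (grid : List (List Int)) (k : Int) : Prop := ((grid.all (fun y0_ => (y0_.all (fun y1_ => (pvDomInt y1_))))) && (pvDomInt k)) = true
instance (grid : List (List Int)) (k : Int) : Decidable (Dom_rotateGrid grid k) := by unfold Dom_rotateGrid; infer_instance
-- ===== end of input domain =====

-- B rewrites A's eight unrolled ring loops (with pop()/continue corner bookkeeping) as one
-- coordinate-list pass per ring: read values, rotate by slicing, zip-write back.
-- Both Pythons mutate `grid` in place identically (same cells, same final values); the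
-- equivalence proved here is about the returned value.

-- ===== PORT A =====
-- grid[r][c] read; exact for in-range indices (out-of-range raises in Python; Pre_ excludes)
def pyGet2 (g : List (List Int)) (r c : Int) : Int :=
  PySem.List.pyGetD (PySem.List.pyGetD g r []) c 0

-- grid[r][c] = v; exact for nonnegative in-range indices (the only ones either program uses)
def pySet2 (g : List (List Int)) (r c : Int) (v : Int) : List (List Int) :=
  g.modify r.toNat (fun row => row.set c.toNat v)

-- one sequential write step: grid[r][c] = linar.pop(0)
def wstep (st : List (List Int) × List Int) (rc : Int × Int) : List (List Int) × List Int :=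
  (pySet2 st.1 rc.1 rc.2 st.2.headI, st.2.tail)

-- body of A's `for i in range(term)` loop, transliterated
def layerA (m n k : Int) (g : List (List Int)) (i : Int) : List (List Int) :=
  let l1 := ((PySem.List.pyRange i (n - i) 1).foldl (fun l j => l ++ [pyGet2 g i j]) []).dropLast
  let l2 := ((PySem.List.pyRange i (m - i) 1).foldl (fun l p => l ++ [pyGet2 g p (n - i - 1)]) l1).dropLast
  let l3 := ((PySem.List.pyRange (n - i - 1) (i - 1) (-1)).foldl (fun l j => l ++ [pyGet2 g (m - i - 1) j]) l2).dropLast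
  let l4 := ((PySem.List.pyRange (m - i - 1) (i - 1) (-1)).foldl (fun l p => l ++ [pyGet2 g p i]) l3).dropLast
  let kk := PySem.Int.mod k (l4.length : Int)
  let lin := (PySem.List.pyRange 0 kk 1).foldl (fun l _ => l.tail ++ [l.headI]) l4
  let st1 := (PySem.List.pyRange i (n - i) 1).foldl (fun st j => wstep st (i, j)) (g, lin)
  let st2 := (PySem.List.pyRange i (m - i) 1).foldl
      (fun st p => if p = i then st else wstep st (p, n - i - 1)) st1
  let st3 := (PySem.List.pyRange (n - i - 1) (i - 1) (-1)).foldl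
      (fun st j => if j = n - i - 1 then st else wstep st (m - i - 1, j)) st2
  let st4 := (PySem.List.pyRange (m - i - 1) (i - 1) (-1)).foldl
      (fun st p => if p = m - i - 1 ∨ p = i then st else wstep st (p, i)) st3
  st4.1

def rotateGrid (grid : List (List Int)) (k : Int) : List (List Int) :=
  let m : Int := (grid.length : Int)
  let n : Int := ((PySem.List.pyGetD grid 0 []).length : Int)
  (PySem.List.pyRange 0 (PySem.Int.floordiv (min m n) 2) 1).foldl (layerA m n k) grid

-- ===== PORT B =====
-- the ring's coordinates, clockwise from (i,i), each corner once (Source B's four comprehensions)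
def coordsB (m n i : Int) : List (Int × Int) :=
  (PySem.List.pyRange i (n - i - 1) 1).map (fun j => (i, j))
  ++ (PySem.List.pyRange i (m - i - 1) 1).map (fun p => (p, n - i - 1))
  ++ (PySem.List.pyRange (n - i - 1) i (-1)).map (fun j => (m - i - 1, j))
  ++ (PySem.List.pyRange (m - i - 1) i (-1)).map (fun p => (p, i))

-- body of Source B's per-ring pass
def layerB (m n k : Int) (g : List (List Int)) (i : Int) : List (List Int) :=
  let coords := coordsB m n i
  let vals := coords.map (fun rc => pyGet2 g rc.1 rc.2)
  let s := PySem.Int.mod k (vals.length : Int)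
  let vals2 := PySem.List.slice vals (some s) none ++ PySem.List.slice vals none (some s)
  (coords.zip vals2).foldl (fun g rcv => pySet2 g rcv.1.1 rcv.1.2 rcv.2) g

def rotateGrid_alt (grid : List (List Int)) (k : Int) : List (List Int) :=
  let m : Int := (grid.length : Int)
  let n : Int := ((PySem.List.pyGetD grid 0 []).length : Int)
  (PySem.List.pyRange 0 (PySem.Int.floordiv (min m n) 2) 1).foldl (layerB m n k) grid

-- ===== PRECONDITION & SPEC =====
-- exactly the inputs where Python A returns: grid nonempty, and either no ring is rotated
-- (min(m,n)//2 = 0) or every row reaches column n-1 (otherwise an IndexError during layer 0)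
def Pre_rotateGrid (grid : List (List Int)) (k : Int) : Prop :=
  grid ≠ [] ∧ (min grid.length grid.headI.length / 2 = 0 ∨ ∀ row ∈ grid, grid.headI.length ≤ row.length)

instance (grid : List (List Int)) (k : Int) : Decidable (Pre_rotateGrid grid k) := by
  unfold Pre_rotateGrid; infer_instance

def pvWitness_rotateGrid : List (List Int) × Int := ([[1, 2], [3, 4]], 1)

def Spec_rotateGrid (grid : List (List Int)) (k : Int) (out : List (List Int)) : Prop := out = rotateGrid_alt grid k
instance (grid : List (List Int)) (k : Int) (out : List (List Int)) : Decidable (Spec_rotateGrid grid k out) := by unfold Spec_rotateGrid; infer_instance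

-- ===== CLAIM (what is proved, stated in full; the proofs are below) =====
def Claim_equal_rotateGrid : Prop := ∀ (grid : List (List Int)) (k : Int), Dom_rotateGrid grid k → Pre_rotateGrid grid k → Spec_rotateGrid grid k (rotateGrid grid k)

-- ===== LEMMAS AND PROOFS =====

-- a foldl that ignores the elements is an iterate
theorem foldl_const_iterate {α β : Type} (l : List α) (f : β → β) (b : β) :
    l.foldl (fun b _ => f b) b = f^[l.length] b := by
  induction l generalizing b with
  | nil => rfl
  | cons x xs ih => simp [List.foldl_cons, ih, Function.iterate_succ_apply]

-- t iterations of `linar.append(linar.pop(0))` rotate left by t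
theorem rot_iterate (t : Nat) : ∀ (l : List Int), t ≤ l.length →
    (fun l : List Int => l.tail ++ [l.headI])^[t] l = l.drop t ++ l.take t := by
  induction t with
  | zero => intro l _; simp
  | succ t ih =>
    intro l hl
    cases l with
    | nil => simp at hl
    | cons x xs =>
      rw [Function.iterate_succ_apply]
      simp only [List.tail_cons, List.headI_cons]
      rw [ih (xs ++ [x]) (by simp at hl ⊢; omega)]
      have ht : t ≤ xs.length := by simp at hl; omega
      rw [List.drop_append_of_le_length ht, List.take_append_of_le_length ht]
      simp [List.take_succ_cons, List.drop_succ_cons]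

-- writing values by zip = writing them by sequential pop(0)
theorem zip_write (coords : List (Int × Int)) : ∀ (g : List (List Int)) (vals : List Int),
    coords.length ≤ vals.length →
    (coords.zip vals).foldl (fun g rcv => pySet2 g rcv.1.1 rcv.1.2 rcv.2) g
      = (coords.foldl wstep (g, vals)).1 := by
  induction coords with
  | nil => intro g vals _; rfl
  | cons rc cs ih =>
    intro g vals h
    cases vals with
    | nil => simp at h
    | cons v vs =>
      simp only [List.zip_cons_cons, List.foldl_cons]
      rw [ih (pySet2 g rc.1 rc.2 v) vs (by simpa using h)]
      rfl

-- splitting off the last element of a countdown range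
theorem pyRange_neg_append (a b : Int) (h : b ≤ a) :
    PySem.List.pyRange a (b - 1) (-1) = PySem.List.pyRange a b (-1) ++ [b] := by
  rw [PySem.List.pyRange_neg_one_eq_reverse, PySem.List.pyRange_neg_one_eq_reverse]
  rw [show b - 1 + 1 = b from by ring]
  rw [PySem.List.pyRange_one_cons (show b < a + 1 by omega)]
  simp

theorem flatten_map_singleton {α β : Type} (l : List α) (f : α → β) :
    (l.map (fun x => [f x])).flatten = l.map f := by
  induction l <;> simp_all

-- A's read phase (append loops + pop()) produces exactly the values at B's ring coordinates
theorem readA_eq (m n i : Int) (h0 : 0 ≤ i) (hm : 2 * i + 2 ≤ m) (hn : 2 * i + 2 ≤ n)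
    (g : List (List Int)) :
    ((PySem.List.pyRange (m - i - 1) (i - 1) (-1)).foldl (fun l p => l ++ [pyGet2 g p i])
      (((PySem.List.pyRange (n - i - 1) (i - 1) (-1)).foldl (fun l j => l ++ [pyGet2 g (m - i - 1) j])
        (((PySem.List.pyRange i (m - i) 1).foldl (fun l p => l ++ [pyGet2 g p (n - i - 1)])
          (((PySem.List.pyRange i (n - i) 1).foldl (fun l j => l ++ [pyGet2 g i j]) []).dropLast)).dropLast)).dropLast)).dropLast
    = (coordsB m n i).map (fun rc => pyGet2 g rc.1 rc.2) := by
  have e1 : PySem.List.pyRange i (n - i) 1 = PySem.List.pyRange i (n - i - 1) 1 ++ [n - i - 1] := by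
    have h := PySem.List.pyRange_one_succ_right (a := i) (b := n - i - 1) (by omega)
    rwa [show n - i - 1 + 1 = n - i from by ring] at h
  have e2 : PySem.List.pyRange i (m - i) 1 = PySem.List.pyRange i (m - i - 1) 1 ++ [m - i - 1] := by
    have h := PySem.List.pyRange_one_succ_right (a := i) (b := m - i - 1) (by omega)
    rwa [show m - i - 1 + 1 = m - i from by ring] at h
  have e3 : PySem.List.pyRange (n - i - 1) (i - 1) (-1)
      = PySem.List.pyRange (n - i - 1) i (-1) ++ [i] := pyRange_neg_append _ _ (by omega)
  have e4 : PySem.List.pyRange (m - i - 1) (i - 1) (-1)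
      = PySem.List.pyRange (m - i - 1) i (-1) ++ [i] := pyRange_neg_append _ _ (by omega)
  rw [e1, e2, e3, e4]
  simp [coordsB, List.map_append, List.dropLast_append_of_ne_nil, List.map_map,
    Function.comp_def, List.append_assoc, flatten_map_singleton]

-- A's write phase (four loops with continue-skipped corners) is the sequential write
-- along B's coordinate list
theorem writeA_eq (m n i : Int) (h0 : 0 ≤ i) (hm : 2 * i + 2 ≤ m) (hn : 2 * i + 2 ≤ n)
    (g : List (List Int)) (lin : List Int) :
    ((PySem.List.pyRange (m - i - 1) (i - 1) (-1)).foldl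
        (fun st p => if p = m - i - 1 ∨ p = i then st else wstep st (p, i))
      ((PySem.List.pyRange (n - i - 1) (i - 1) (-1)).foldl
        (fun st j => if j = n - i - 1 then st else wstep st (m - i - 1, j))
      ((PySem.List.pyRange i (m - i) 1).foldl
        (fun st p => if p = i then st else wstep st (p, n - i - 1))
      ((PySem.List.pyRange i (n - i) 1).foldl (fun st j => wstep st (i, j)) (g, lin)))))
    = (coordsB m n i).foldl wstep (g, lin) := by
  have hstep2 : ∀ st : List (List Int) × List Int,
      (PySem.List.pyRange i (m - i) 1).foldl
        (fun st p => if p = i then st else wstep st (p, n - i - 1)) st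
      = (PySem.List.pyRange (i + 1) (m - i) 1).foldl (fun st p => wstep st (p, n - i - 1)) st := by
    intro st
    rw [PySem.List.pyRange_one_cons (show i < m - i by omega)]
    simp only [List.foldl_cons, if_pos]
    exact PySem.List.foldl_congr_mem _ _ _ _ (fun acc x hx => by
      rw [PySem.List.mem_pyRange_one] at hx
      rw [if_neg (by omega)])
  have hstep3 : ∀ st : List (List Int) × List Int,
      (PySem.List.pyRange (n - i - 1) (i - 1) (-1)).foldl
        (fun st j => if j = n - i - 1 then st else wstep st (m - i - 1, j)) st
      = (PySem.List.pyRange (n - i - 2) (i - 1) (-1)).foldl (fun st j => wstep st (m - i - 1, j)) st := by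
    intro st
    rw [PySem.List.pyRange_neg_one_cons (show i - 1 < n - i - 1 by omega)]
    simp only [List.foldl_cons, if_pos]
    rw [show n - i - 1 - 1 = n - i - 2 from by ring]
    exact PySem.List.foldl_congr_mem _ _ _ _ (fun acc x hx => by
      rw [PySem.List.mem_pyRange_neg_one] at hx
      rw [if_neg (by omega)])
  have hstep4 : ∀ st : List (List Int) × List Int,
      (PySem.List.pyRange (m - i - 1) (i - 1) (-1)).foldl
        (fun st p => if p = m - i - 1 ∨ p = i then st else wstep st (p, i)) st
      = (PySem.List.pyRange (m - i - 2) i (-1)).foldl (fun st p => wstep st (p, i)) st := by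
    intro st
    rw [PySem.List.pyRange_neg_one_cons (show i - 1 < m - i - 1 by omega)]
    rw [show m - i - 1 - 1 = m - i - 2 from by ring]
    rw [pyRange_neg_append (m - i - 2) i (by omega)]
    simp only [List.foldl_cons, List.foldl_append, List.foldl_nil]
    simp only [or_true, true_or, if_true]
    exact PySem.List.foldl_congr_mem _ _ _ st (fun acc x hx => by
      rw [PySem.List.mem_pyRange_neg_one] at hx
      rw [if_neg (by push Not; omega)])
  rw [hstep2, hstep3, hstep4]
  have e1 : PySem.List.pyRange i (n - i) 1 = PySem.List.pyRange i (n - i - 1) 1 ++ [n - i - 1] := by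
    have h := PySem.List.pyRange_one_succ_right (a := i) (b := n - i - 1) (by omega)
    rwa [show n - i - 1 + 1 = n - i from by ring] at h
  have eR : PySem.List.pyRange (i + 1) (m - i) 1
      = PySem.List.pyRange (i + 1) (m - i - 1) 1 ++ [m - i - 1] := by
    have h := PySem.List.pyRange_one_succ_right (a := i + 1) (b := m - i - 1) (by omega)
    rwa [show m - i - 1 + 1 = m - i from by ring] at h
  have eBo : PySem.List.pyRange (n - i - 2) (i - 1) (-1)
      = PySem.List.pyRange (n - i - 2) i (-1) ++ [i] := pyRange_neg_append _ _ (by omega)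
  have eRB : PySem.List.pyRange i (m - i - 1) 1
      = i :: PySem.List.pyRange (i + 1) (m - i - 1) 1 :=
    PySem.List.pyRange_one_cons (by omega)
  have eBoB : PySem.List.pyRange (n - i - 1) i (-1)
      = (n - i - 1) :: PySem.List.pyRange (n - i - 2) i (-1) := by
    rw [PySem.List.pyRange_neg_one_cons (show i < n - i - 1 by omega),
      show n - i - 1 - 1 = n - i - 2 from by ring]
  have eLB : PySem.List.pyRange (m - i - 1) i (-1)
      = (m - i - 1) :: PySem.List.pyRange (m - i - 2) i (-1) := by
    rw [PySem.List.pyRange_neg_one_cons (show i < m - i - 1 by omega),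
      show m - i - 1 - 1 = m - i - 2 from by ring]
  rw [e1, eR, eBo]
  simp only [coordsB, eRB, eBoB, eLB, List.foldl_append, List.foldl_cons, List.foldl_nil,
    List.foldl_map, List.map_cons]

-- per-ring equality: A's unrolled pop/continue pass equals B's coordinate pass
theorem layer_eq (m n k : Int) (g : List (List Int)) (i : Int)
    (h0 : 0 ≤ i) (hm : 2 * i + 2 ≤ m) (hn : 2 * i + 2 ≤ n) :
    layerA m n k g i = layerB m n k g i := by
  have hclen : 1 ≤ (coordsB m n i).length := by
    simp [coordsB, PySem.List.length_pyRange_one, PySem.List.length_pyRange_neg_one]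
    omega
  simp only [layerA, layerB]
  rw [readA_eq m n i h0 hm hn g]
  have hlen : ((coordsB m n i).map (fun rc => pyGet2 g rc.1 rc.2)).length
      = (coordsB m n i).length := by simp
  have hLpos : 0 < ((((coordsB m n i).map (fun rc => pyGet2 g rc.1 rc.2)).length : Nat) : Int) := by
    rw [hlen]; exact_mod_cast hclen
  have h0s : 0 ≤ PySem.Int.mod k (((coordsB m n i).map (fun rc => pyGet2 g rc.1 rc.2)).length : Int) :=
    PySem.Int.mod_nonneg k hLpos
  have hslt : PySem.Int.mod k (((coordsB m n i).map (fun rc => pyGet2 g rc.1 rc.2)).length : Int)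
      < (((coordsB m n i).map (fun rc => pyGet2 g rc.1 rc.2)).length : Int) :=
    PySem.Int.mod_lt k hLpos
  have hrot : (PySem.List.pyRange 0
        (PySem.Int.mod k (((coordsB m n i).map (fun rc => pyGet2 g rc.1 rc.2)).length : Int)) 1).foldl
        (fun l _ => l.tail ++ [l.headI]) ((coordsB m n i).map (fun rc => pyGet2 g rc.1 rc.2))
      = PySem.List.slice ((coordsB m n i).map (fun rc => pyGet2 g rc.1 rc.2))
          (some (PySem.Int.mod k (((coordsB m n i).map (fun rc => pyGet2 g rc.1 rc.2)).length : Int))) none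
        ++ PySem.List.slice ((coordsB m n i).map (fun rc => pyGet2 g rc.1 rc.2)) none
          (some (PySem.Int.mod k (((coordsB m n i).map (fun rc => pyGet2 g rc.1 rc.2)).length : Int))) := by
    rw [foldl_const_iterate, PySem.List.length_pyRange_one]
    rw [show PySem.Int.mod k (((coordsB m n i).map (fun rc => pyGet2 g rc.1 rc.2)).length : Int) - 0
        = PySem.Int.mod k (((coordsB m n i).map (fun rc => pyGet2 g rc.1 rc.2)).length : Int) from by ring]
    rw [rot_iterate _ _ (by omega)]
    rw [PySem.List.slice_from _ h0s, PySem.List.slice_to _ h0s]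
  rw [hrot, writeA_eq m n i h0 hm hn g]
  rw [zip_write (coordsB m n i) g _ (by
    rw [PySem.List.slice_from _ h0s, PySem.List.slice_to _ h0s]
    simp
    omega)]

-- ===== VERDICT =====
theorem rotateGrid_spec : Claim_equal_rotateGrid := by
  intro grid k _hdom _hpre
  show rotateGrid grid k = rotateGrid_alt grid k
  simp only [rotateGrid, rotateGrid_alt]
  apply PySem.List.foldl_congr_mem
  intro acc x hx
  rw [PySem.List.mem_pyRange_one] at hx
  have hx2 := hx.2
  rw [PySem.Int.floordiv_eq_ediv_of_pos (by norm_num)] at hx2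
  exact layer_eq _ _ k acc x hx.1 (by omega) (by omega)
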